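-- pv_equiv track=rewrite | github.com/Rafael-Alexandrini/TrabalhoCPD | teste.py | remover_espacos
-- ===== SOURCE A (Python) =====
-- def remover_espacos(s):
--     inicio = 0
--     while inicio < len(s) and s[inicio] == ' ':
--         inicio += 1
--
--     fim = len(s) - 1
--     while fim >= 0 and s[fim] == ' ':
--         fim -= 1
--
--     if inicio > fim:
--         return ""  # string vazia (só espaços)
--     else:
--         resultado = ""
--         for i in range(inicio, fim + 1):
--             resultado += s[i]
--         return resultado
-- ===== SOURCE B (Python) =====
-- def remover_espacos(s):
--     return s.strip(' ')
-- ===== Notes on version B (the rewrite author's own statement) =====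
-- stated objective: idiomatic
-- what changed: replaces the two manual index-scanning while loops and the character-by-character string rebuild with a single strip-with-explicit-space-argument library call
import Mathlib
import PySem

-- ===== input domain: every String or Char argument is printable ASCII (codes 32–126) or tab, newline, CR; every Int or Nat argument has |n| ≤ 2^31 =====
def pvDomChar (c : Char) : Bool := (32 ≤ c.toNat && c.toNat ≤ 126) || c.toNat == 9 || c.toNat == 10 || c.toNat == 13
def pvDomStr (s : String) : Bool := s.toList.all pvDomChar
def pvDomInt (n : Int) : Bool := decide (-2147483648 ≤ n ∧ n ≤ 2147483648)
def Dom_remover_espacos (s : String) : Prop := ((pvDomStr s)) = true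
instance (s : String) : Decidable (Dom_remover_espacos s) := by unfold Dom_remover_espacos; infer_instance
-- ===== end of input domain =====

-- B replaces A's two manual index-scanning loops and char-by-char rebuild with one s.strip(' ') call (idiomatic).


-- ===== PORT A =====
-- while inicio < len(s) and s[inicio] == ' ': inicio += 1
def pvScanStart (cs : List Char) (inicio : Nat) : Nat :=
  if h : inicio < cs.length then
    if cs[inicio] = ' ' then pvScanStart cs (inicio + 1) else inicio
  else inicio
termination_by cs.length - inicio
decreasing_by omega

-- while fim >= 0 and s[fim] == ' ': fim -= 1
def pvScanEnd (cs : List Char) (fim : Int) : Int :=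
  if 0 ≤ fim ∧ PySem.List.pyGetD cs fim ' ' = ' ' then
    pvScanEnd cs (fim - 1)
  else fim
termination_by (fim + 1).toNat
decreasing_by omega

def remover_espacos (s : String) : String :=
  let cs := s.toList
  let inicio := pvScanStart cs 0
  let fim := pvScanEnd cs ((cs.length : Int) - 1)
  if (inicio : Int) > fim then ""
  else
    -- resultado = ""; for i in range(inicio, fim + 1): resultado += s[i]
    String.ofList ((PySem.List.pyRange inicio (fim + 1) 1).foldl
      (fun resultado i => resultado ++ [PySem.List.pyGetD cs i ' ']) [])

-- ===== PORT B =====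
def remover_espacos_alt (s : String) : String := PySem.Str.stripChars s " "

-- ===== PRECONDITION & SPEC =====
def Spec_remover_espacos (s : String) (out : String) : Prop := out = remover_espacos_alt s
instance (s : String) (out : String) : Decidable (Spec_remover_espacos s out) := by unfold Spec_remover_espacos; infer_instance

-- ===== CLAIM (what is proved, stated in full; the proofs are below) =====
def Claim_equal_remover_espacos : Prop := ∀ (s : String), Dom_remover_espacos s → Spec_remover_espacos s (remover_espacos s)

-- ===== LEMMAS AND PROOFS =====

lemma pvScanStart_eq (cs : List Char) (i : Nat) :
    pvScanStart cs i = i + ((cs.drop i).takeWhile (fun c => c == ' ')).length := by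
  fun_induction pvScanStart cs i with
  | case1 i h hsp ih =>
    rw [ih, List.drop_eq_getElem_cons h, List.takeWhile_cons]
    simp only [hsp]
    simp
    omega
  | case2 i h hsp =>
    rw [List.drop_eq_getElem_cons h, List.takeWhile_cons]
    simp [hsp]
  | case3 i h =>
    rw [List.drop_eq_nil_iff.mpr (by omega)]
    simp

lemma pvScanEnd_eq (cs : List Char) (n : Nat) (hn : n ≤ cs.length) :
    pvScanEnd cs ((n : Int) - 1)
      = (n : Int) - 1 - (((cs.take n).reverse.takeWhile (fun c => c == ' ')).length : Int) := by
  induction n with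
  | zero => rw [pvScanEnd]; simp
  | succ m ih =>
    have hm : m < cs.length := by omega
    rw [pvScanEnd]
    have hget : PySem.List.pyGetD cs (((m + 1 : Nat) : Int) - 1) ' ' = cs[m] := by
      have e : (((m + 1 : Nat) : Int) - 1) = ((m : Nat) : Int) := by push_cast; ring
      rw [e, PySem.List.pyGetD_natCast]
      simp [List.getElem?_eq_getElem hm]
    by_cases hsp : cs[m] = ' '
    · rw [if_pos ⟨by omega, by rw [hget]; exact hsp⟩]
      rw [show (((m + 1 : Nat) : Int) - 1 - 1) = ((m : Int) - 1) from by push_cast; ring,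
        ih (by omega)]
      rw [List.take_add_one, List.getElem?_eq_getElem hm]
      simp [hsp]
      omega
    · rw [if_neg (by rw [hget]; simp [hsp])]
      have e0 : (List.takeWhile (fun c => c == ' ') (List.take (m+1) cs).reverse) = [] := by
        rw [List.take_add_one, List.getElem?_eq_getElem hm]
        simp only [Option.toList_some, List.reverse_append, List.reverse_cons,
          List.reverse_nil, List.nil_append, List.singleton_append, List.takeWhile_cons]
        simp [hsp]
      rw [e0]
      simp

lemma pvMapRange (cs : List Char) (d : Char) (a n : Nat) (h : a + n ≤ cs.length) :
    (PySem.List.pyRange (a : Int) ((a : Int) + (n : Int)) 1).map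
        (fun i => PySem.List.pyGetD cs i d) = (cs.drop a).take n := by
  induction n generalizing a with
  | zero =>
    simp [PySem.List.pyRange]
  | succ m ih =>
    rw [show ((a:Int) + ((m + 1 : Nat):Int)) = ((a:Int) + 1 + (m:Int)) from by push_cast; ring]
    rw [PySem.List.pyRange_one_cons (by omega)]
    have ha : a < cs.length := by omega
    rw [List.map_cons]
    have hga : PySem.List.pyGetD cs (a : Int) d = cs[a] := by
      rw [PySem.List.pyGetD_natCast]
      simp [List.getD_eq_getElem?_getD, List.getElem?_eq_getElem ha]
    rw [hga, show ((a:Int)+1) = ((a+1 : Nat) : Int) by push_cast; ring, ih (a+1) (by omega)]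
    rw [List.drop_eq_getElem_cons ha, List.take_succ_cons]

lemma pvContains_eq : (fun c => ([' '] : List Char).contains c) = (fun c => c == ' ') := by
  funext c
  simp only [List.contains_cons, List.contains_nil, Bool.or_false]

lemma pvDropWhile_eq_drop (p : Char → Bool) (l : List Char) :
    l.dropWhile p = l.drop (l.takeWhile p).length := by
  induction l with
  | nil => simp
  | cons x xs ih => by_cases h : p x <;> simp [h, ih]

theorem pvMain (s : String) : remover_espacos s = remover_espacos_alt s := by
  simp only [remover_espacos, remover_espacos_alt, PySem.Str.stripChars,
    PySem.Chars.stripChars]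
  rw [show (" ".toList) = [' '] from rfl, pvContains_eq]
  set cs := s.toList with hcs
  set sp : Char → Bool := fun c => c == ' ' with hsp
  have ha := pvScanStart_eq cs 0
  simp only [List.drop_zero, Nat.zero_add] at ha
  have hb := pvScanEnd_eq cs cs.length le_rfl
  rw [List.take_length] at hb
  set a := (cs.takeWhile sp).length with haL
  set b := (cs.reverse.takeWhile sp).length with hbL
  set M := cs.dropWhile sp with hM
  have hsplit : cs.takeWhile sp ++ M = cs := List.takeWhile_append_dropWhile
  have hlen : a + M.length = cs.length := by
    conv_rhs => rw [← hsplit]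
    simp [haL]
  by_cases hMnil : M = []
  · -- all spaces
    have hM0 : M.length = 0 := by rw [hMnil]; rfl
    have haLen : a = cs.length := by omega
    rw [ha, hb]
    rw [if_pos (by rw [haLen]; omega)]
    rw [hMnil]
    simp
  · -- some non-space
    have hhead : sp (M.head hMnil) = false := List.head_dropWhile_not sp hMnil
    have hb' : b = (M.reverse.takeWhile sp).length := by
      rw [hbL]
      conv_lhs => rw [← hsplit]
      rw [List.reverse_append, List.takeWhile_append]
      have hne : (M.reverse.takeWhile sp).length ≠ M.reverse.length := by
        intro hE
        have := List.IsPrefix.eq_of_length (List.takeWhile_prefix sp) hE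
        have hmem : M.head hMnil ∈ M.reverse.takeWhile sp := by
          rw [this]
          simp [List.head_mem]
        have := List.mem_takeWhile_imp hmem
        rw [hhead] at this
        exact absurd this (by simp)
      rw [if_neg hne]
    have hbLt : (M.reverse.takeWhile sp).length < M.length := by
      have := List.takeWhile_prefix (l := M.reverse) sp
      have hle := this.length_le
      rw [List.length_reverse] at hle
      rcases lt_or_eq_of_le hle with h | h
      · exact h
      · exfalso; apply absurd (hb' ▸ h) ?_; intro _
        have hE : (M.reverse.takeWhile sp).length = M.reverse.length := by
          rw [List.length_reverse]; exact h
        have := List.IsPrefix.eq_of_length (List.takeWhile_prefix sp) hE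
        have hmem : M.head hMnil ∈ M.reverse.takeWhile sp := by
          rw [this]; simp [List.head_mem]
        have := List.mem_takeWhile_imp hmem
        rw [hhead] at this
        exact absurd this (by simp)
    set b' := (M.reverse.takeWhile sp).length with hb'L
    rw [ha, hb, hb']
    rw [if_neg (by omega)]
    -- else branch
    rw [PySem.List.foldl_append_singleton_eq_map]
    have hn : ((cs.length : Int) - 1 - (b' : Int) + 1) = (a : Int) + ((M.length - b' : Nat) : Int) := by
      push_cast [Nat.cast_sub (le_of_lt hbLt)]
      omega
    rw [hn, pvMapRange cs ' ' a (M.length - b') (by omega)]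
    have hdrop : cs.drop a = M := by
      conv_lhs => rw [← hsplit]
      rw [haL, List.drop_left]
    rw [hdrop]
    -- RHS
    have hdw : M.reverse.dropWhile sp = M.reverse.drop b' := by
      rw [hb'L]; exact pvDropWhile_eq_drop sp M.reverse
    rw [hdw, List.reverse_drop, List.reverse_reverse, List.length_reverse]
    simp

-- ===== VERDICT (by name: the statement is the Claim_ definition above) =====
theorem remover_espacos_spec : Claim_equal_remover_espacos := by
  intro s _
  unfold Spec_remover_espacos
  exact pvMain s
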